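-- pv_equiv track=rewrite | github.com/Priya1202/DSA | Print Diagonally - GFG/print-diagonally.py | downwardDiagonal
-- ===== SOURCE A (Python) =====
-- def downwardDiagonal(N, A):
--     # code here
--     arr=[]
--     for i in range(0,N):
--         row = 0
--         col = i
--         while col>=0:
--             arr.append(A[row][col])
--             col-=1
--             row+=1
--     for i in range(1,N):
--         col = N-1
--         row = i
--         while row<=N-1:
--             arr.append(A[row][col])
--             col-=1
--             row+=1
--     return arr
-- ===== SOURCE B (Python) =====
-- def downwardDiagonal(N, A):
--     # One row-major pass grouping elements into buckets by diagonal index row+col,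
--     # then concatenate the buckets in order.
--     buckets = [[] for _ in range(2 * N - 1)]
--     for row in range(N):
--         for col in range(N):
--             buckets[row + col].append(A[row][col])
--     out = []
--     for b in buckets:
--         out += b
--     return out
-- ===== Notes on version B (the rewrite author's own statement) =====
-- stated objective: simpler
-- what changed: Replaces A's two-phase diagonal walk (for each starting cell, a while loop stepping row+=1/col-=1) by a single row-major pass that appends each element to a bucket keyed by its diagonal index row+col, then concatenates the buckets in order.
import Mathlib
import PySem

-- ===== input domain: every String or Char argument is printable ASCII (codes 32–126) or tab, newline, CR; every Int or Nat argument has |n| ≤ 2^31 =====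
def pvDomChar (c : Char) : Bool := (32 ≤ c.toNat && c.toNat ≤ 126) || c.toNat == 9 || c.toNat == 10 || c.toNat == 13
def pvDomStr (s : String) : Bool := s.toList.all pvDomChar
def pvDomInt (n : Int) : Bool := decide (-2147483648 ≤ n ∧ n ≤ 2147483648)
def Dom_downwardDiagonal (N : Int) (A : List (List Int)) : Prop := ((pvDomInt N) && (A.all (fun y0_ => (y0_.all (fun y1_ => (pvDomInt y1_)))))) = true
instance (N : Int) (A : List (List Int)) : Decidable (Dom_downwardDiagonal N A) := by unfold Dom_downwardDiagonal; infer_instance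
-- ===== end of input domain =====

-- B replaces A's two-phase diagonal walk (pairs of while loops moving row/col) by a single
-- row-major pass that groups elements into buckets keyed by the diagonal index row+col,
-- then concatenates the buckets; objective: simpler/alternative, same O(N^2) cost.

-- A[row][col] (both ports index like this; Pre_ guarantees the indices are in range)
def pvCell (A : List (List Int)) (r c : Int) : Int :=
  PySem.List.pyGetD (PySem.List.pyGetD A r []) c 0

-- ===== PORT A =====
-- inner 'while col>=0' loop of the first phase
def pvAInner1 (A : List (List Int)) (row col : Int) (arr : List Int) : List Int :=
  if h : 0 ≤ col then pvAInner1 A (row + 1) (col - 1) (arr ++ [pvCell A row col]) else arr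
  termination_by (col + 1).toNat
  decreasing_by omega

-- inner 'while row<=N-1' loop of the second phase
def pvAInner2 (A : List (List Int)) (N row col : Int) (arr : List Int) : List Int :=
  if h : row ≤ N - 1 then pvAInner2 A N (row + 1) (col - 1) (arr ++ [pvCell A row col]) else arr
  termination_by (N - row).toNat
  decreasing_by omega

def downwardDiagonal (N : Int) (A : List (List Int)) : List Int :=
  let arr := (PySem.List.pyRange 0 N 1).foldl (fun arr i => pvAInner1 A 0 i arr) []
  (PySem.List.pyRange 1 N 1).foldl (fun arr i => pvAInner2 A N i (N - 1) arr) arr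

-- ===== PORT B =====
def downwardDiagonal_alt (N : Int) (A : List (List Int)) : List Int :=
  let buckets :=
    (PySem.List.pyRange 0 N 1).foldl (fun bs row =>
      (PySem.List.pyRange 0 N 1).foldl (fun bs col =>
        bs.modify (row + col).toNat (fun b => b ++ [pvCell A row col])) bs)
    (List.replicate (2 * N - 1).toNat [])
  buckets.foldl (fun out b => out ++ b) []

-- ===== PRECONDITION & SPEC =====
-- Pre_ excludes exactly the inputs where the Python raises IndexError: when N ≥ 1 both
-- programs read every cell A[r][c] with 0 ≤ r,c < N, so A needs at least N rows whose
-- first N each have at least N entries (for N ≤ 0 both return [] unconditionally).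
def Pre_downwardDiagonal (N : Int) (A : List (List Int)) : Prop :=
  N ≤ (A.length : Int) ∧ ∀ row ∈ A.take N.toNat, N ≤ (row.length : Int)
instance (N : Int) (A : List (List Int)) : Decidable (Pre_downwardDiagonal N A) := by
  unfold Pre_downwardDiagonal; infer_instance

def pvWitness_downwardDiagonal : Int × List (List Int) := (2, [[1, 2], [3, 4]])

def Spec_downwardDiagonal (N : Int) (A : List (List Int)) (out : List Int) : Prop := out = downwardDiagonal_alt N A
instance (N : Int) (A : List (List Int)) (out : List Int) : Decidable (Spec_downwardDiagonal N A out) := by unfold Spec_downwardDiagonal; infer_instance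

-- ===== CLAIM (what is proved, stated in full; the proofs are below) =====
def Claim_equal_downwardDiagonal : Prop := ∀ (N : Int) (A : List (List Int)), Dom_downwardDiagonal N A → Pre_downwardDiagonal N A → Spec_downwardDiagonal N A (downwardDiagonal N A)

-- ===== LEMMAS AND PROOFS =====

-- the common normal form: element r of diagonal d is A[r][d-r]
def pvDiagRows (n k d : Nat) : List Nat :=
  (List.range k).filter (fun r => decide (r ≤ d ∧ d < r + n))

def pvSpecList (A : List (List Int)) (n : Nat) : List Int :=
  (List.range (2 * n - 1)).flatMap (fun (d : Nat) =>
    (pvDiagRows n n d).map (fun (r : Nat) => pvCell A (r : Int) ((d : Int) - (r : Int))))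

-- ---- generic range/filter facts ----
lemma filter_range_le (n d : Nat) :
    (List.range n).filter (fun r => decide (r ≤ d)) = List.range (min (d + 1) n) := by
  induction n with
  | zero => simp
  | succ n ih =>
      rw [List.range_succ, List.filter_append, ih]
      by_cases h : n ≤ d
      · have : min (d + 1) n = n := by omega
        have h2 : min (d + 1) (n + 1) = n + 1 := by omega
        simp [h, this, h2, List.range_succ]
      · have : min (d + 1) n = min (d + 1) (n + 1) := by omega
        simp [h, this]

lemma filter_range_ge (n a : Nat) :
    (List.range n).filter (fun r => decide (a ≤ r)) =
      (List.range (n - a)).map (fun k => a + k) := by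
  induction n with
  | zero => simp
  | succ n ih =>
      rw [List.range_succ, List.filter_append, ih]
      by_cases h : a ≤ n
      · have hn : n + 1 - a = (n - a) + 1 := by omega
        have hna : a + (n - a) = n := by omega
        simp [h, hn, List.range_succ, hna]
      · have : n + 1 - a = 0 := by omega
        simp [h, this, Nat.sub_eq_zero_of_le (by omega : n ≤ a)]

lemma diagRows_low (n d : Nat) (hd : d < n) :
    pvDiagRows n n d = List.range (d + 1) := by
  unfold pvDiagRows
  rw [List.filter_congr (q := fun r => decide (r ≤ d))
      (by intro x hx; simp only [List.mem_range] at hx; simp only [decide_eq_decide]; omega)]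
  rw [filter_range_le]
  have : min (d + 1) n = d + 1 := by omega
  rw [this]

lemma diagRows_high (n d : Nat) (hn : n ≤ d) (hd : d < 2 * n - 1) :
    pvDiagRows n n d = (List.range (2 * n - 1 - d)).map (fun k => (d - n + 1) + k) := by
  unfold pvDiagRows
  rw [List.filter_congr (q := fun r => decide (d - n + 1 ≤ r))
      (by intro x hx; simp only [List.mem_range] at hx; simp only [decide_eq_decide]; omega)]
  rw [filter_range_ge]
  have : n - (d - n + 1) = 2 * n - 1 - d := by omega
  rw [this]

-- ---- A side ----
lemma pvAInner1_eq (A : List (List Int)) :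
    ∀ (c : Nat) (row : Int) (arr : List Int),
      pvAInner1 A row (c : Int) arr
        = arr ++ (List.range (c + 1)).map (fun (k : Nat) => pvCell A (row + (k : Int)) ((c : Int) - (k : Int))) := by
  intro c
  induction c with
  | zero =>
      intro row arr
      rw [pvAInner1]; simp
      rw [pvAInner1]; simp
  | succ c ih =>
      intro row arr
      rw [pvAInner1]
      have h : (0 : Int) ≤ ((c + 1 : Nat) : Int) := by positivity
      rw [dif_pos h]
      have hc : ((c + 1 : Nat) : Int) - 1 = (c : Int) := by push_cast; ring
      rw [hc, ih, List.append_assoc, List.singleton_append]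
      congr 1
      conv_rhs => rw [List.range_succ_eq_map]
      rw [List.map_cons, List.map_map]
      congr 1
      · push_cast; ring_nf
      · apply List.map_congr_left
        intro k hk
        simp only [Function.comp_apply, Nat.succ_eq_add_one]
        push_cast; ring_nf

lemma pvAInner2_eq (A : List (List Int)) (N : Int) :
    ∀ (m : Nat) (col : Int) (arr : List Int),
      pvAInner2 A N (N - (m : Int)) col arr
        = arr ++ (List.range m).map (fun (k : Nat) => pvCell A (N - (m : Int) + (k : Int)) (col - (k : Int))) := by
  intro m
  induction m with
  | zero =>
      intro col arr
      rw [pvAInner2, dif_neg (by push_cast; omega : ¬ (N - ((0 : Nat) : Int) ≤ N - 1))]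
      simp
  | succ m ih =>
      intro col arr
      rw [pvAInner2]
      have h : N - ((m + 1 : Nat) : Int) ≤ N - 1 := by push_cast; omega
      rw [dif_pos h]
      have e1 : N - ((m + 1 : Nat) : Int) + 1 = N - (m : Int) := by push_cast; ring
      rw [e1, ih, List.append_assoc, List.singleton_append]
      congr 1
      conv_rhs => rw [List.range_succ_eq_map]
      rw [List.map_cons, List.map_map]
      congr 1
      · push_cast; ring_nf
      · apply List.map_congr_left
        intro k hk
        simp only [Function.comp_apply, Nat.succ_eq_add_one]
        push_cast; ring_nf

-- ---- B side ----
lemma modify_mapIdx_range (M i : Nat) (h : Nat → List Int) (f : List Int → List Int) :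
    ((List.range M).map h).modify i f
      = (List.range M).map (fun d => if i = d then f (h d) else h d) := by
  apply List.ext_getElem
  · simp [List.length_modify]
  · intro j h1 h2
    rw [List.getElem_modify]
    simp only [List.getElem_map, List.getElem_range]

-- the inner fold over the columns of row r, after conversion to a Nat range
lemma innerB_eq (A : List (List Int)) (r : Nat) (M : Nat) (h : Nat → List Int) :
    ∀ (m : Nat),
      (List.range m).foldl (fun bs (c : Nat) =>
          bs.modify (((r : Int) + (c : Int)).toNat) (fun b => b ++ [pvCell A (r : Int) (c : Int)]))
        ((List.range M).map h)
      = (List.range M).map (fun d =>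
          if r ≤ d ∧ d < r + m then h d ++ [pvCell A (r : Int) ((d : Int) - (r : Int))] else h d) := by
  intro m
  induction m with
  | zero => simp
  | succ m ih =>
      rw [List.range_succ, List.foldl_append, ih]
      simp only [List.foldl_cons, List.foldl_nil]
      have ht : (((r : Int) + (m : Int)).toNat) = r + m := by omega
      rw [ht, modify_mapIdx_range]
      apply List.map_congr_left
      intro d hd
      by_cases h1 : r + m = d
      · subst h1
        rw [if_pos rfl, if_neg (by omega : ¬(r ≤ r + m ∧ r + m < r + m)),
            if_pos (⟨by omega, by omega⟩ : r ≤ r + m ∧ r + m < r + (m + 1))]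
        have : ((m : Int)) = ((r + m : Nat) : Int) - (r : Int) := by push_cast; ring
        rw [this]
      · rw [if_neg h1]
        have e : (r ≤ d ∧ d < r + (m + 1)) ↔ (r ≤ d ∧ d < r + m) := by
          constructor
          · rintro ⟨a, b⟩; exact ⟨a, by omega⟩
          · rintro ⟨a, b⟩; exact ⟨a, by omega⟩
        by_cases h2 : r ≤ d ∧ d < r + m
        · rw [if_pos h2, if_pos (e.mpr h2)]
        · rw [if_neg h2, if_neg (fun hc => h2 (e.mp hc))]

-- the outer fold over rows: bucket d holds the elements of diagonal d from the first k rows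
lemma outerB_eq (A : List (List Int)) (n : Nat) :
    ∀ (k : Nat),
      (List.range k).foldl (fun bs (r : Nat) =>
          (List.range n).foldl (fun bs (c : Nat) =>
              bs.modify (((r : Int) + (c : Int)).toNat) (fun b => b ++ [pvCell A (r : Int) (c : Int)])) bs)
        (List.replicate (2 * n - 1) [])
      = (List.range (2 * n - 1)).map (fun (d : Nat) =>
          (pvDiagRows n k d).map (fun (r : Nat) => pvCell A (r : Int) ((d : Int) - (r : Int)))) := by
  intro k
  induction k with
  | zero =>
      simp [pvDiagRows]
  | succ k ih =>
      rw [List.range_succ, List.foldl_append, ih]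
      simp only [List.foldl_cons, List.foldl_nil]
      rw [innerB_eq]
      apply List.map_congr_left
      intro d hd
      unfold pvDiagRows
      rw [List.range_succ, List.filter_append, List.map_append]
      by_cases h1 : k ≤ d ∧ d < k + n
      · simp [h1]
      · have : ¬ (k ≤ d ∧ d < k + n) := h1
        simp [this]

-- ---- assembling the two sides ----
lemma alt_eq_spec (N : Int) (A : List (List Int)) (n : Nat) (hN : N = (n : Int)) :
    downwardDiagonal_alt N A = pvSpecList A n := by
  subst hN
  simp only [downwardDiagonal_alt]
  rw [PySem.List.pyRange_zero_natCast, List.foldl_map]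
  have hrep : (2 * (n : Int) - 1).toNat = 2 * n - 1 := by omega
  rw [hrep]
  have hfold := PySem.List.foldl_congr_mem
    (l := List.range n)
    (init := List.replicate (2 * n - 1) ([] : List Int))
    (f := fun bs (r : Nat) =>
      (List.map (fun (k : Nat) => (k : Int)) (List.range n)).foldl (fun bs col =>
        bs.modify (((r : Int) + col).toNat) (fun b => b ++ [pvCell A (r : Int) col])) bs)
    (g := fun bs (r : Nat) =>
      (List.range n).foldl (fun bs (c : Nat) =>
        bs.modify (((r : Int) + (c : Int)).toNat) (fun b => b ++ [pvCell A (r : Int) (c : Int)])) bs)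
    (by intro bs r _; dsimp only; rw [List.foldl_map])
  rw [hfold, outerB_eq, PySem.List.foldl_append_eq_flatten, List.nil_append]
  rw [pvSpecList, List.flatMap_def]

lemma pvCell_congr (A : List (List Int)) {a b a' b' : Int} (h1 : a = a') (h2 : b = b') :
    pvCell A a b = pvCell A a' b' := by rw [h1, h2]

lemma a_eq_spec (N : Int) (A : List (List Int)) (n : Nat) (hN : N = (n : Int)) (hn : 1 ≤ n) :
    downwardDiagonal N A = pvSpecList A n := by
  subst hN
  simp only [downwardDiagonal]
  rw [PySem.List.pyRange_zero_natCast, List.foldl_map]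
  have hstep1 := PySem.List.foldl_congr_mem (l := List.range n) (init := ([] : List Int))
    (f := fun arr (i : Nat) => pvAInner1 A 0 ((i : Int)) arr)
    (g := fun arr (i : Nat) => arr ++ (List.range (i + 1)).map
        (fun (k : Nat) => pvCell A (0 + (k : Int)) ((i : Int) - (k : Int))))
    (by intro arr i _; exact pvAInner1_eq A i 0 arr)
  rw [hstep1, PySem.List.foldl_append_eq_flatMap, List.nil_append]
  rw [PySem.List.pyRange_one, List.foldl_map]
  have h1 : ((n : Int) - 1).toNat = n - 1 := by omega
  rw [h1]
  have hstep2 := PySem.List.foldl_congr_mem (l := List.range (n - 1))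
    (init := (List.range n).flatMap (fun (i : Nat) => (List.range (i + 1)).map
        (fun (k : Nat) => pvCell A (0 + (k : Int)) ((i : Int) - (k : Int)))))
    (f := fun arr (k : Nat) => pvAInner2 A (n : Int) (1 + (k : Int)) ((n : Int) - 1) arr)
    (g := fun arr (k : Nat) => arr ++ (List.range (n - 1 - k)).map
        (fun (j : Nat) => pvCell A ((n : Int) - ((n - 1 - k : Nat) : Int) + (j : Int)) ((n : Int) - 1 - (j : Int))))
    (by
      intro arr k hk
      simp only [List.mem_range] at hk
      have hm : (1 : Int) + (k : Int) = (n : Int) - ((n - 1 - k : Nat) : Int) := by omega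
      dsimp only
      rw [hm]
      exact pvAInner2_eq A (n : Int) (n - 1 - k) ((n : Int) - 1) arr)
  rw [hstep2, PySem.List.foldl_append_eq_flatMap]
  rw [pvSpecList]
  have h2 : 2 * n - 1 = n + (n - 1) := by omega
  rw [h2, List.range_add, List.flatMap_append]
  congr 1
  · rw [List.flatMap_def, List.flatMap_def]
    congr 1
    apply List.map_congr_left
    intro d hd
    simp only [List.mem_range] at hd
    rw [diagRows_low n d hd]
    apply List.map_congr_left
    intro k hk
    exact pvCell_congr A (by omega) rfl
  · conv_rhs => rw [List.flatMap_def, List.map_map]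
    rw [List.flatMap_def]
    congr 1
    apply List.map_congr_left
    intro k hk
    simp only [List.mem_range] at hk
    simp only [Function.comp_apply]
    rw [diagRows_high n (n + k) (by omega) (by omega)]
    have e1 : 2 * n - 1 - (n + k) = n - 1 - k := by omega
    have e2 : n + k - n + 1 = k + 1 := by omega
    rw [e1, e2, List.map_map]
    apply List.map_congr_left
    intro j hj
    simp only [List.mem_range] at hj
    simp only [Function.comp_apply]
    exact pvCell_congr A (by omega) (by omega)

-- ===== VERDICT (by name: the statement is the Claim_ definition above) =====
theorem downwardDiagonal_spec : Claim_equal_downwardDiagonal := by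
  intro N A _ _
  unfold Spec_downwardDiagonal
  by_cases hN : 0 < N
  · have hn : N = ((N.toNat : Nat) : Int) := by omega
    rw [a_eq_spec N A N.toNat hn (by omega), alt_eq_spec N A N.toNat hn]
  · -- N ≤ 0: both sides are []
    have h1 : PySem.List.pyRange 0 N 1 = [] := PySem.List.pyRange_one_eq_nil (by omega)
    have h2 : PySem.List.pyRange 1 N 1 = [] := PySem.List.pyRange_one_eq_nil (by omega)
    unfold downwardDiagonal downwardDiagonal_alt
    rw [h1, h2]
    simp [PySem.List.foldl_append_eq_flatten]
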